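-- pv_equiv track=rewrite | github.com/SangmyungUm/Programmers | 프로그래머스/Lv.0/181926. 수 조작하기 1/수 조작하기 1.py | solution
-- ===== SOURCE A (Python) =====
-- def solution(n, control):
--     answer = n
--     for i in control:
--         if i == "w":
--             answer += 1
--         if i == "s":
--             answer += -1
--         if i == "d":
--             answer += 10
--         if i == "a":
--             answer += -10
--     return answer
-- ===== SOURCE B (Python) =====
-- def solution(n, control):
--     return (n + control.count("w") - control.count("s")
--               + 10 * control.count("d") - 10 * control.count("a"))
-- ===== Notes on version B (the rewrite author's own statement) =====
-- stated objective: idiomatic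
-- what changed: Replaces the per-character accumulation loop with four str.count tallies combined in one closed-form arithmetic expression.
import Mathlib
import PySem

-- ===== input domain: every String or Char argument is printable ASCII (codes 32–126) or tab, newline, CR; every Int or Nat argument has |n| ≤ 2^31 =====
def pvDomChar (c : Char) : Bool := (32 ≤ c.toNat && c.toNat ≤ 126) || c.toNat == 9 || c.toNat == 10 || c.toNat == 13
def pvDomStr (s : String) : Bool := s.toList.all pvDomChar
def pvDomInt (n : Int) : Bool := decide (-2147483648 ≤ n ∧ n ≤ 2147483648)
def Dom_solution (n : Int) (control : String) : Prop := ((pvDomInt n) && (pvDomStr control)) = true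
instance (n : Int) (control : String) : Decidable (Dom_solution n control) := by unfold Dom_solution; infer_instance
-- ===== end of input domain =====

-- B replaces A's per-character accumulation loop with four str.count tallies combined in one arithmetic expression (idiomatic).

-- ===== PORT A =====
-- one loop step: the four sequential 'if' statements of A's body
def solutionStep (answer : Int) (i : Char) : Int :=
  let answer := if i == 'w' then answer + 1 else answer
  let answer := if i == 's' then answer + (-1) else answer
  let answer := if i == 'd' then answer + 10 else answer
  let answer := if i == 'a' then answer + (-10) else answer
  answer

def solution (n : Int) (control : String) : Int :=
  control.toList.foldl solutionStep n

-- ===== PORT B =====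
def solution_alt (n : Int) (control : String) : Int :=
  n + (PySem.Str.count control "w" : Int) - (PySem.Str.count control "s" : Int)
    + 10 * (PySem.Str.count control "d" : Int) - 10 * (PySem.Str.count control "a" : Int)

-- ===== PRECONDITION & SPEC =====
def Spec_solution (n : Int) (control : String) (out : Int) : Prop := out = solution_alt n control
instance (n : Int) (control : String) (out : Int) : Decidable (Spec_solution n control out) := by unfold Spec_solution; infer_instance

-- ===== CLAIM (what is proved, stated in full; the proofs are below) =====
def Claim_equal_solution : Prop := ∀ (n : Int) (control : String), Dom_solution n control → Spec_solution n control (solution n control)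

-- ===== LEMMAS AND PROOFS =====

-- Chars.count with a one-character needle is List.count
theorem count_go_singleton (c : Char) (l : List Char) (fuel : Nat) (acc : Nat)
    (h : l.length ≤ fuel) :
    PySem.Chars.count.go [c] fuel l acc = acc + l.count c := by
  induction l generalizing fuel acc with
  | nil => cases fuel <;> simp [PySem.Chars.count.go]
  | cons hd t ih =>
    cases fuel with
    | zero => simp at h
    | succ f =>
      simp only [List.length_cons, Nat.succ_le_succ_iff] at h
      by_cases hc : hd = c
      · subst hc
        simp only [PySem.Chars.count.go]
        rw [if_pos (by simp [List.isPrefixOf])]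
        simp only [List.length_singleton, List.drop_one, List.tail_cons]
        rw [ih f (acc + 1) h]
        simp
        omega
      · simp only [PySem.Chars.count.go]
        rw [if_neg (by simp [List.isPrefixOf]; exact fun h' => hc h'.symm)]
        rw [ih f acc h]
        simp [hc]

theorem str_count_singleton (s : String) (c : Char) :
    PySem.Str.count s (String.ofList [c]) = s.toList.count c := by
  rw [PySem.Str.count_eq]
  have hmk : (String.ofList [c]).toList = [c] := by simp
  rw [show (String.ofList [c]) = String.ofList [c] from rfl] -- same function
  rw [hmk]
  unfold PySem.Chars.count
  simp only [List.isEmpty_cons, Bool.false_eq_true, if_false]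
  rw [count_go_singleton c s.toList s.toList.length 0 (le_refl _)]
  omega

theorem foldl_step (n : Int) (l : List Char) :
    l.foldl solutionStep n =
      n + (l.count 'w' : Int) - (l.count 's' : Int)
        + 10 * (l.count 'd' : Int) - 10 * (l.count 'a' : Int) := by
  induction l generalizing n with
  | nil => simp
  | cons hd t ih =>
    simp only [List.foldl_cons, ih, List.count_cons]
    unfold solutionStep
    by_cases hw : hd = 'w' <;> by_cases hs : hd = 's' <;> by_cases hd' : hd = 'd' <;> by_cases ha : hd = 'a' <;>
      simp_all <;> ring

-- ===== VERDICT (by name: the statement is the Claim_ definition above) =====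
theorem solution_spec : Claim_equal_solution := by
  intro n control _
  unfold Spec_solution solution solution_alt
  rw [foldl_step]
  have hw := str_count_singleton control 'w'
  have hs := str_count_singleton control 's'
  have hd := str_count_singleton control 'd'
  have ha := str_count_singleton control 'a'
  simp only [show String.ofList ['w'] = "w" from rfl, show String.ofList ['s'] = "s" from rfl,
    show String.ofList ['d'] = "d" from rfl, show String.ofList ['a'] = "a" from rfl] at hw hs hd ha
  rw [hw, hs, hd, ha]
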